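-- pv_equiv track=rewrite | github.com/Nghia03092004/nghia03092004.github.io | project_euler_unified/problem_987/solution.py | cyclotomic_exact
-- ===== SOURCE A (Python) =====
-- def divisors(n: int):
--     """Return sorted list of divisors of n."""
--     divs = []
--     d = 1
--     while d * d <= n:
--         if n % d == 0:
--             divs.append(d)
--             if d != n // d:
--                 divs.append(n // d)
--         d += 1
--     return sorted(divs)
--
-- def cyclotomic_exact(N: int) -> list:
--     """Compute exact Phi_n(2) for n = 1..N (no modular reduction)."""
--     phi = [0] * (N + 1)
--     for n in range(1, N + 1):
--         num = 2**n - 1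
--         den = 1
--         for d in divisors(n):
--             if d < n:
--                 den *= phi[d]
--         phi[n] = num // den
--     return phi
-- ===== SOURCE B (Python) =====
-- def cyclotomic_exact(N: int) -> list:
--     """Compute exact Phi_n(2) for n = 1..N (no modular reduction)."""
--     # Sieve proper-divisor lists once, instead of per-n trial division + sort.
--     divs = [[] for _ in range(N + 1)]
--     for d in range(1, N + 1):
--         for m in range(2 * d, N + 1, d):
--             divs[m].append(d)
--     phi = [0] * (N + 1)
--     for n in range(1, N + 1):
--         den = 1
--         for d in divs[n]:
--             den *= phi[d]
--         phi[n] = (2 ** n - 1) // den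
--     return phi
-- ===== Notes on version B (the rewrite author's own statement) =====
-- stated objective: alternative
-- what changed: Per-n trial division up to sqrt(n) plus a sort is replaced by one ascending sieve that appends each d to the divisor list of every proper multiple, so divisor lists are built once and already sorted; the exact big-integer divisions are unchanged.
import Mathlib
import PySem

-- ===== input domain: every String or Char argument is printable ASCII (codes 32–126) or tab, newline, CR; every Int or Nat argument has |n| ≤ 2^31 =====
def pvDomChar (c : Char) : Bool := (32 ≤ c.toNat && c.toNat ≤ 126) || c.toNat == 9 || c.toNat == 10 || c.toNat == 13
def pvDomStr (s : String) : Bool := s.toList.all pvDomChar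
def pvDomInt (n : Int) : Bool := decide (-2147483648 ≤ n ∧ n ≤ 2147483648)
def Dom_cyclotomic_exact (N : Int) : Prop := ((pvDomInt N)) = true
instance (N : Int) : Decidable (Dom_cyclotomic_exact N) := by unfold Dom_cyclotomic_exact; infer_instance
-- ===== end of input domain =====

-- B replaces A's per-n trial-division divisor enumeration (+sort) with a single
-- ascending sieve that pushes each d onto the divisor lists of its proper multiples;
-- same exact integers Phi_n(2) are returned. (A mutates no argument; equivalence is
-- about the return value.)

-- ===== PORT A =====
-- the while-loop of divisors(): d walks up while d*d <= n, appending d and n//d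
def pyDivisorsLoop (n : Int) (d : Int) (divs : List Int) : List Int :=
  if h : d * d ≤ n then
    let divs1 := if PySem.Int.mod n d == 0 then
        (if d ≠ PySem.Int.floordiv n d then
          (divs ++ [d]) ++ [PySem.Int.floordiv n d]
        else divs ++ [d])
      else divs
    pyDivisorsLoop n (d + 1) divs1
  else divs
termination_by (n + 1 - d).toNat
decreasing_by
  have h1 : d ≤ n := by nlinarith [sq_nonneg d, sq_nonneg (d-1)]
  omega

-- sorted list of divisors of n (Python divisors())
def divisors (n : Int) : List Int :=
  PySem.List.sorted (pyDivisorsLoop n 1 []) (fun x => x) false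

def cyclotomic_exact (N : Int) : List Int :=
  let phi : List Int := List.replicate (N + 1).toNat 0
  (PySem.List.pyRange 1 (N + 1) 1).foldl (fun phi n =>
    let num : Int := 2 ^ n.toNat - 1
    let den : Int := (divisors n).foldl (fun den d =>
      if d < n then den * PySem.List.pyGetD phi d 0 else den) 1
    PySem.List.pySetD phi n (PySem.Int.floordiv num den)) phi

-- ===== PORT B =====
def cyclotomic_exact_alt (N : Int) : List Int :=
  let divs0 : List (List Int) := List.replicate (N + 1).toNat []
  let divs : List (List Int) := (PySem.List.pyRange 1 (N + 1) 1).foldl (fun t d =>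
    (PySem.List.pyRange (2 * d) (N + 1) d).foldl (fun t m =>
      PySem.List.pySetD t m (PySem.List.pyGetD t m [] ++ [d])) t) divs0
  let phi : List Int := List.replicate (N + 1).toNat 0
  (PySem.List.pyRange 1 (N + 1) 1).foldl (fun phi n =>
    let den : Int := (PySem.List.pyGetD divs n []).foldl (fun den d =>
      den * PySem.List.pyGetD phi d 0) 1
    PySem.List.pySetD phi n (PySem.Int.floordiv (2 ^ n.toNat - 1) den)) phi

-- ===== PRECONDITION & SPEC =====
def Spec_cyclotomic_exact (N : Int) (out : List Int) : Prop := out = cyclotomic_exact_alt N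
instance (N : Int) (out : List Int) : Decidable (Spec_cyclotomic_exact N out) := by unfold Spec_cyclotomic_exact; infer_instance

-- ===== CLAIM (what is proved, stated in full; the proofs are below) =====
def Claim_equal_cyclotomic_exact : Prop := ∀ (N : Int), Dom_cyclotomic_exact N → Spec_cyclotomic_exact N (cyclotomic_exact N)

-- ===== LEMMAS AND PROOFS =====

def pdiv (m : Nat) : List Nat := (List.range m).filter (fun d => decide (d ∣ m))
def adiv (n : Nat) : List Nat := (List.range (n+1)).filter (fun d => decide (d ∣ n))

lemma filter_range_congr (a b : Nat) (p q : Nat → Bool)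
    (h : ∀ d, (d < a ∧ p d = true) ↔ (d < b ∧ q d = true)) :
    (List.range a).filter p = (List.range b).filter q := by
  apply PySem.List.eq_of_perm_of_pairwise_le_of_injective (fun x => x) (fun _ _ h => h)
  · rw [List.perm_ext_iff_of_nodup (List.Nodup.filter _ (List.nodup_range))
      (List.Nodup.filter _ (List.nodup_range))]
    intro x
    simp only [List.mem_filter, List.mem_range]
    exact h x
  · exact List.Pairwise.filter _ ((List.pairwise_lt_range).imp le_of_lt)
  · exact List.Pairwise.filter _ ((List.pairwise_lt_range).imp le_of_lt)
def Sl (n d : Nat) : List Nat :=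
  (List.range (n+1)).filter
    (fun e => decide (e ∣ n ∧ ((d ≤ e ∧ e*e ≤ n) ∨ (n < e*e ∧ d*e ≤ n))))

lemma mem_Sl {n d e : Nat} (hn : 1 ≤ n) :
    e ∈ Sl n d ↔ e ∣ n ∧ ((d ≤ e ∧ e*e ≤ n) ∨ (n < e*e ∧ d*e ≤ n)) := by
  simp only [Sl, List.mem_filter, List.mem_range, decide_eq_true_eq]
  constructor
  · rintro ⟨_, h⟩; exact h
  · intro h; exact ⟨by have := Nat.le_of_dvd hn h.1; omega, h⟩

lemma nodup_Sl (n d : Nat) : (Sl n d).Nodup := List.Nodup.filter _ List.nodup_range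

lemma Sl_step_not (n d : Nat) (hn : 1 ≤ n) (_hd : 1 ≤ d) (hdvd : ¬ d ∣ n) :
    Sl n d = Sl n (d+1) := by
  unfold Sl
  apply List.filter_congr
  intro e _
  rw [decide_eq_decide]
  constructor
  · rintro ⟨he, h1 | h2⟩
    · refine ⟨he, Or.inl ⟨?_, h1.2⟩⟩
      rcases Nat.eq_or_lt_of_le h1.1 with rfl | h
      · exact absurd he hdvd
      · omega
    · refine ⟨he, Or.inr ⟨h2.1, ?_⟩⟩
      by_contra hgt
      obtain ⟨k, rfl⟩ := he
      have he0 : 0 < e := Nat.pos_of_ne_zero (by rintro rfl; simp at hn)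
      have hk1 : d ≤ k := Nat.le_of_mul_le_mul_left (by linarith [h2.2, Nat.mul_comm d e]) he0
      have hk2 : k < d + 1 := Nat.lt_of_mul_lt_mul_left (a := e) (by nlinarith [h2.2])
      have : k = d := by omega
      exact hdvd ⟨e, by rw [this]; ring⟩
  · rintro ⟨he, h1 | h2⟩
    · exact ⟨he, Or.inl ⟨by omega, h1.2⟩⟩
    · exact ⟨he, Or.inr ⟨h2.1, by nlinarith [h2.2]⟩⟩

lemma Sl_step_sq (n d : Nat) (hn : 1 ≤ n) (hd : 1 ≤ d) (hsq : n = d * d) :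
    (Sl n d).Perm (d :: Sl n (d+1)) := by
  have hdn : d ∉ Sl n (d+1) := by
    rw [mem_Sl hn]
    rintro ⟨_, h1 | h2⟩ <;> omega
  rw [List.perm_ext_iff_of_nodup (nodup_Sl n d) (by exact List.Nodup.cons hdn (nodup_Sl n (d+1)))]
  intro e
  simp only [List.mem_cons, mem_Sl hn]
  constructor
  · rintro ⟨he, h1 | h2⟩
    · left
      obtain ⟨k, rfl⟩ := he
      nlinarith [h1.1, h1.2]
    · exfalso
      have he0 : 0 < e := Nat.pos_of_dvd_of_pos he hn
      nlinarith [h2.1, h2.2]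
  · rintro (rfl | ⟨he, h1 | h2⟩)
    · exact ⟨⟨_, hsq⟩, Or.inl ⟨le_refl _, by omega⟩⟩
    · exact ⟨he, Or.inl ⟨by omega, h1.2⟩⟩
    · exact ⟨he, Or.inr ⟨h2.1, by nlinarith [h2.2]⟩⟩

lemma Sl_step_two (n d : Nat) (hn : 1 ≤ n) (hd : 1 ≤ d) (hdvd : d ∣ n)
    (hdd : d * d ≤ n) (hne : d ≠ n / d) :
    (Sl n d).Perm (d :: n / d :: Sl n (d+1)) := by
  set q := n / d with hq
  have hnq : n = d * q := (Nat.mul_div_cancel' hdvd).symm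
  have hq0 : 0 < q := Nat.pos_of_ne_zero (by rintro h; rw [h, Nat.mul_zero] at hnq; omega)
  have hdq : d < q := by
    have : d ≤ q := Nat.le_of_mul_le_mul_left (by nlinarith) hd
    omega
  have hqd : q ∣ n := ⟨d, by rw [hnq]; ring⟩
  have hdn : d ∉ Sl n (d+1) := by
    rw [mem_Sl hn]
    rintro ⟨_, h1 | h2⟩
    · omega
    · nlinarith [h2.1, h2.2]
  have hqn : q ∉ Sl n (d+1) := by
    rw [mem_Sl hn]
    rintro ⟨_, h1 | h2⟩
    · nlinarith [h1.1, h1.2]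
    · nlinarith [h2.2]
  rw [List.perm_ext_iff_of_nodup (nodup_Sl n d)
    (by
      refine List.Nodup.cons ?_ (List.Nodup.cons hqn (nodup_Sl n (d+1)))
      simp only [List.mem_cons]
      rintro (h | h)
      · omega
      · exact hdn h)]
  intro e
  simp only [List.mem_cons, mem_Sl hn]
  constructor
  · rintro ⟨he, h1 | h2⟩
    · by_cases hed : e = d
      · exact Or.inl hed
      · exact Or.inr (Or.inr ⟨he, Or.inl ⟨by omega, h1.2⟩⟩)
    · by_cases heq : e = q
      · exact Or.inr (Or.inl heq)
      · refine Or.inr (Or.inr ⟨he, Or.inr ⟨h2.1, ?_⟩⟩)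
        by_contra hgt
        have he0 : 0 < e := Nat.pos_of_dvd_of_pos he hn
        obtain ⟨k, hk⟩ := he
        have hk1 : d ≤ k := Nat.le_of_mul_le_mul_left (by nlinarith [h2.2]) he0
        have hk2 : k < d + 1 := Nat.lt_of_mul_lt_mul_left (a := e) (by nlinarith [h2.2])
        have hkd : k = d := by omega
        apply heq
        have : n = q * d := by rw [hnq]; ring
        have : e * d = q * d := by rw [← this, hk, hkd]
        exact Nat.eq_of_mul_eq_mul_right hd (by linarith)
  · rintro (rfl | rfl | ⟨he, h1 | h2⟩)
    · exact ⟨hdvd, Or.inl ⟨le_refl _, hdd⟩⟩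
    · exact ⟨hqd, Or.inr ⟨by nlinarith, by nlinarith⟩⟩
    · exact ⟨he, Or.inl ⟨by omega, h1.2⟩⟩
    · exact ⟨he, Or.inr ⟨h2.1, by nlinarith [h2.2]⟩⟩

lemma Sl_nil (n d : Nat) (hn : 1 ≤ n) (hd : 1 ≤ d) (h : n < d*d) : Sl n d = [] := by
  rw [Sl, List.filter_eq_nil_iff]
  intro e he
  simp only [List.mem_range] at he
  simp only [decide_eq_true_eq]
  rintro ⟨hdvd, h1 | h2⟩
  · nlinarith [h1.1, h1.2]
  · have he1 : 1 ≤ e := Nat.pos_of_dvd_of_pos hdvd hn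
    nlinarith [h2.1, h2.2]

lemma Sl_one (n : Nat) (hn : 1 ≤ n) : Sl n 1 = adiv n := by
  apply filter_range_congr
  intro e
  simp only [decide_eq_true_eq]
  constructor
  · rintro ⟨he, hdvd, _⟩; exact ⟨he, hdvd⟩
  · rintro ⟨he, hdvd⟩
    refine ⟨he, hdvd, ?_⟩
    have he1 : 1 ≤ e := Nat.pos_of_dvd_of_pos hdvd hn
    have hle : e ≤ n := Nat.le_of_dvd hn hdvd
    by_cases h : e*e ≤ n
    · exact Or.inl ⟨he1, h⟩
    · exact Or.inr ⟨by omega, by omega⟩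

lemma loop_perm (n : Nat) (hn : 1 ≤ n) : ∀ (k d : Nat), 1 ≤ d → n + 1 - d ≤ k →
    ∀ acc : List Int,
    (pyDivisorsLoop (n:Int) (d:Int) acc).Perm (acc ++ (Sl n d).map (fun e : Nat => (e : Int))) := by
  intro k
  induction k with
  | zero =>
    intro d hd hk acc
    have hled : d ≤ d * d := Nat.le_mul_of_pos_left d hd
    have hdd : ¬ ((d:Int) * d ≤ n) := by
      intro hc
      have : d * d ≤ n := by exact_mod_cast hc
      omega
    rw [pyDivisorsLoop, dif_neg hdd, Sl_nil n d hn hd (by omega)]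
    simp
  | succ k ih =>
    intro d hd hk acc
    by_cases hdd : d * d ≤ n
    · have hdd' : ((d:Int) * d ≤ n) := by exact_mod_cast hdd
      have hdle : d ≤ n := le_trans (Nat.le_mul_of_pos_left d hd) hdd
      rw [pyDivisorsLoop, dif_pos hdd']
      simp only [PySem.Int.mod_natCast, PySem.Int.floordiv_natCast]
      by_cases hdvd : d ∣ n
      · have hmod : n % d = 0 := by
          obtain ⟨k, rfl⟩ := hdvd
          exact Nat.mul_mod_right d k
        rcases eq_or_ne d (n / d) with heq | hne2
        · have hsq : n = d * d := by conv_lhs => rw [← Nat.mul_div_cancel' hdvd, ← heq]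
          have hcond : ¬ ((d:Int) ≠ ((n/d : Nat) : Int)) := by simp [← heq]
          simp only [hmod, Nat.cast_zero, beq_self_eq_true, if_true, if_neg hcond]
          have hrec := ih (d+1) (by omega) (by omega) (acc ++ [(d:Int)])
          rw [(by push_cast; ring : ((d+1 : Nat) : Int) = (d:Int) + 1)] at hrec
          refine hrec.trans ?_
          have hperm := List.Perm.map (fun e : Nat => (e : Int)) (Sl_step_sq n d hn hd hsq)
          have heq2 : acc ++ [(d:Int)] ++ (Sl n (d+1)).map (fun e : Nat => (e : Int))
              = acc ++ (((d:Int)) :: (Sl n (d+1)).map (fun e : Nat => (e : Int))) := by simp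
          rw [heq2]
          exact List.Perm.append_left acc hperm.symm
        · have hne2' : ((d:Int)) ≠ ((n/d : Nat) : Int) := by
            intro hc; exact hne2 (by exact_mod_cast hc)
          simp only [hmod, Nat.cast_zero, beq_self_eq_true, if_true, if_pos hne2']
          have hrec := ih (d+1) (by omega) (by omega) ((acc ++ [(d:Int)]) ++ [((n/d : Nat) : Int)])
          rw [(by push_cast; ring : ((d+1 : Nat) : Int) = (d:Int) + 1)] at hrec
          refine hrec.trans ?_
          have hperm := List.Perm.map (fun e : Nat => (e : Int)) (Sl_step_two n d hn hd hdvd hdd hne2)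
          have heq2 : (acc ++ [(d:Int)]) ++ [((n/d : Nat) : Int)] ++ (Sl n (d+1)).map (fun e : Nat => (e : Int))
              = acc ++ (((d:Int)) :: ((n/d : Nat) : Int) :: (Sl n (d+1)).map (fun e : Nat => (e : Int))) := by
            simp
          rw [heq2]
          exact List.Perm.append_left acc hperm.symm
      · have hmod : ¬ (n % d = 0) := fun hc => hdvd (Nat.dvd_of_mod_eq_zero hc)
        have : (((n % d : Nat) : Int) == 0) = false := by
          simp only [beq_eq_false_iff_ne, ne_eq]
          exact_mod_cast hmod
        simp only [this]
        have hrec := ih (d+1) (by omega) (by omega) acc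
        rw [(by push_cast; ring : ((d+1 : Nat) : Int) = (d:Int) + 1)] at hrec
        rw [Sl_step_not n d hn hd hdvd]
        exact hrec
    · have hdd' : ¬ ((d:Int) * d ≤ n) := by
        intro hc; exact hdd (by exact_mod_cast hc)
      rw [pyDivisorsLoop, dif_neg hdd', Sl_nil n d hn hd (by omega)]
      simp

lemma divisors_eq (n : Nat) (hn : 1 ≤ n) :
    divisors (n : Int) = (adiv n).map (fun e : Nat => (e : Int)) := by
  apply PySem.List.sorted_eq_of_perm_of_pairwise_lt
  · have h := loop_perm n hn (n+1) 1 (le_refl 1) (by omega) []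
    rw [Sl_one n hn] at h
    simpa using h.symm
  · refine List.Pairwise.map _ ?_ (List.Pairwise.filter _ (List.pairwise_lt_range))
    intro a b hab
    exact_mod_cast hab

lemma foldl_mul (l : List Nat) (g : Nat → Int) (a : Int) :
    l.foldl (fun acc x => acc * g x) a = a * (l.map g).prod := by
  induction l generalizing a with
  | nil => simp
  | cons x l ih => simp [ih, mul_assoc]

def phiT : Nat → List Int
  | 0 => [0]
  | n+1 => phiT n ++
      [PySem.Int.floordiv (2 ^ (n+1) - 1)
        (((pdiv (n+1)).map (fun d => (phiT n).getD d 0)).prod)]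

lemma phiT_length (n : Nat) : (phiT n).length = n + 1 := by
  induction n with
  | zero => rfl
  | succ n ih => simp [phiT, ih]

lemma mem_pdiv {m e : Nat} : e ∈ pdiv m ↔ e < m ∧ e ∣ m := by
  simp [pdiv, List.mem_filter, List.mem_range]

-- A's inner den loop over a state list s computes the product over proper divisors
lemma denA_eq (n : Nat) (hn : 1 ≤ n) (s : List Int) :
    (divisors (n:Int)).foldl
      (fun den d => if d < (n:Int) then den * PySem.List.pyGetD s d 0 else den) 1
    = ((pdiv n).map (fun e : Nat => PySem.List.pyGetD s (e : Int) 0)).prod := by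
  rw [divisors_eq n hn, List.foldl_map, PySem.List.foldl_ite_eq_foldl_filter]
  have hfilter : (adiv n).filter (fun e : Nat => decide ((e:Int) < (n:Int))) = pdiv n := by
    rw [adiv, List.filter_filter]
    apply filter_range_congr
    intro d
    simp only [Bool.and_eq_true, decide_eq_true_eq]
    constructor
    · rintro ⟨h1, h2, h3⟩
      exact ⟨by exact_mod_cast h2, h3⟩
    · rintro ⟨h1, h2⟩
      exact ⟨by omega, by exact_mod_cast h1, h2⟩
  rw [hfilter, foldl_mul, one_mul]

lemma mainA (L j : Nat) (hj : j < L) :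
    (PySem.List.pyRange 1 ((j:Int) + 1) 1).foldl
      (fun phi n =>
        PySem.List.pySetD phi n (PySem.Int.floordiv (2 ^ n.toNat - 1)
          ((divisors n).foldl (fun den d =>
            if d < n then den * PySem.List.pyGetD phi d 0 else den) 1)))
      (List.replicate L 0)
    = phiT j ++ List.replicate (L - (j+1)) 0 := by
  induction j with
  | zero =>
    rw [show ((0:Nat):Int) + 1 = 1 by norm_num, PySem.List.pyRange_one_eq_nil (le_refl 1)]
    simp only [List.foldl_nil]
    rw [show L = (L - 1) + 1 by omega, List.replicate_succ]
    simp [phiT]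
  | succ j ih =>
    have hsplit : PySem.List.pyRange 1 (((j+1 : Nat) : Int) + 1) 1
        = PySem.List.pyRange 1 ((j:Int)+1) 1 ++ [(j:Int)+1] := by
      rw [show ((j+1 : Nat) : Int) + 1 = ((j:Int)+1) + 1 by push_cast; ring]
      exact PySem.List.pyRange_one_succ_right (by omega)
    rw [hsplit, List.foldl_append, ih (by omega)]
    set s := phiT j ++ List.replicate (L - (j+1)) 0 with hs
    have hcast : ((j:Int)+1) = ((j+1 : Nat) : Int) := by push_cast; ring
    simp only [List.foldl_cons, List.foldl_nil, hcast]
    rw [denA_eq (j+1) (by omega) s]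
    have hden : ((pdiv (j+1)).map (fun e : Nat => PySem.List.pyGetD s (e:Int) 0))
        = ((pdiv (j+1)).map (fun d => (phiT j).getD d 0)) := by
      apply List.map_eq_map_iff.mpr
      intro e he
      rw [mem_pdiv] at he
      rw [PySem.List.pyGetD_natCast]
      exact List.getD_append _ _ _ _ (by rw [phiT_length]; omega)
    rw [hden, PySem.List.pySetD_natCast, hs,
      List.set_append_right (j+1) _ (by simp [phiT_length])]
    rw [phiT_length]
    simp only [Nat.sub_self]
    rw [show L - (j+1) = (L - (j+2)) + 1 by omega, List.replicate_succ, List.set_cons_zero]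
    simp only [Int.toNat_natCast]
    rw [show phiT (j+1) = phiT j ++
      [PySem.Int.floordiv (2 ^ (j+1) - 1)
        (((pdiv (j+1)).map (fun d => (phiT j).getD d 0)).prod)] from rfl]
    simp [List.append_assoc]

lemma length_setappend (R : List Int) (T : List (List Int)) (v : Int) (h : ∀ x ∈ R, 0 ≤ x) :
    (R.foldl (fun t x => PySem.List.pySetD t x (PySem.List.pyGetD t x [] ++ [v])) T).length
      = T.length := by
  induction R generalizing T with
  | nil => rfl
  | cons x R ih =>
    simp only [List.foldl_cons]
    rw [ih _ (fun y hy => h y (List.mem_cons_of_mem _ hy)), PySem.List.length_pySetD]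

lemma getD_setappend (R : List Int) (hnd : R.Nodup) (hpos : ∀ x ∈ R, 0 ≤ x)
    (T : List (List Int)) (v : Int) (m : Nat) (hm : m < T.length) :
    (R.foldl (fun t x => PySem.List.pySetD t x (PySem.List.pyGetD t x [] ++ [v])) T).getD m []
    = if (m:Int) ∈ R then T.getD m [] ++ [v] else T.getD m [] := by
  induction R generalizing T with
  | nil => simp
  | cons x R ih =>
    have hx0 : 0 ≤ x := hpos x List.mem_cons_self
    simp only [List.foldl_cons]
    have hlen : m < (PySem.List.pySetD T x (PySem.List.pyGetD T x [] ++ [v])).length := by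
      rw [PySem.List.length_pySetD]; exact hm
    rw [ih (List.Nodup.of_cons hnd) (fun y hy => hpos y (List.mem_cons_of_mem _ hy)) _ hlen]
    by_cases hxm : x = (m:Int)
    · have hmem : (m:Int) ∉ R := by
        subst hxm; exact (List.nodup_cons.mp hnd).1
      rw [if_neg hmem, if_pos (by simp [← hxm])]
      subst hxm
      rw [PySem.List.pySetD_of_nonneg T _ hx0]
      rw [show ((m:Int)).toNat = m from by omega, PySem.List.pyGetD_natCast,
        List.getD_eq_getElem?_getD, List.getElem?_set_self (by omega),
        Option.getD_some, List.getD_eq_getElem?_getD]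
    · have hset : (PySem.List.pySetD T x (PySem.List.pyGetD T x [] ++ [v])).getD m []
          = T.getD m [] := by
        rw [PySem.List.pySetD_of_nonneg T _ hx0, List.getD_eq_getElem?_getD,
          List.getElem?_set_ne (by omega), ← List.getD_eq_getElem?_getD]
      rw [hset]
      by_cases hmem : (m:Int) ∈ R
      · rw [if_pos hmem, if_pos (List.mem_cons_of_mem _ hmem)]
      · have hmm : ¬ ((m:Int) ∈ (x :: R)) := by
          simp only [List.mem_cons]
          rintro (h | h)
          · exact hxm h.symm
          · exact hmem h
        rw [if_neg hmem, if_neg hmm]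

def Sv (j m : Nat) : List Nat :=
  (List.range (j+1)).filter (fun e => decide (e ≠ 0 ∧ e ∣ m ∧ 2*e ≤ m))

lemma outer_length (ds : List Int) (hd : ∀ d ∈ ds, 1 ≤ d) (T : List (List Int)) (b : Int) :
    (ds.foldl (fun t d => (PySem.List.pyRange (2*d) b d).foldl
      (fun t m => PySem.List.pySetD t m (PySem.List.pyGetD t m [] ++ [d])) t) T).length
    = T.length := by
  induction ds generalizing T with
  | nil => rfl
  | cons d ds ih =>
    simp only [List.foldl_cons]
    rw [ih (fun y hy => hd y (List.mem_cons_of_mem _ hy)), length_setappend]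
    intro x hx
    have hd1 : (1:Int) ≤ d := hd d List.mem_cons_self
    have := (PySem.List.mem_pyRange_iff_of_pos (by omega) x).mp hx
    omega

lemma nodup_pyRange_pos (a b s : Int) (hs : 0 < s) : (PySem.List.pyRange a b s).Nodup := by
  rw [PySem.List.pyRange_of_pos a b hs]
  refine List.Nodup.map ?_ List.nodup_range
  intro p q hpq
  simp only at hpq
  have : (p:Int) = q := by
    have := hpq
    nlinarith [hpq]
  exact_mod_cast this

lemma sieveB (Nn : Nat) (j : Nat) (hj : j ≤ Nn) (m : Nat) (hm : m ≤ Nn) :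
    ((PySem.List.pyRange 1 ((j:Int)+1) 1).foldl
      (fun t d => (PySem.List.pyRange (2*d) ((Nn:Int)+1) d).foldl
        (fun t m => PySem.List.pySetD t m (PySem.List.pyGetD t m [] ++ [d])) t)
      (List.replicate (Nn+1) ([] : List Int))).getD m []
    = (Sv j m).map (fun e : Nat => (e : Int)) := by
  induction j with
  | zero =>
    rw [show ((0:Nat):Int) + 1 = 1 by norm_num, PySem.List.pyRange_one_eq_nil (le_refl 1)]
    simp only [List.foldl_nil]
    rw [List.getD_eq_getElem?_getD, List.getElem?_replicate]
    have : Sv 0 m = [] := by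
      rw [Sv, List.filter_eq_nil_iff]
      intro e he
      simp only [List.mem_range] at he
      simp only [decide_eq_true_eq]
      omega
    simp [this, hm]
  | succ j ih =>
    have hsplit : PySem.List.pyRange 1 (((j+1 : Nat) : Int) + 1) 1
        = PySem.List.pyRange 1 ((j:Int)+1) 1 ++ [(j:Int)+1] := by
      rw [show ((j+1 : Nat) : Int) + 1 = ((j:Int)+1) + 1 by push_cast; ring]
      exact PySem.List.pyRange_one_succ_right (by omega)
    rw [hsplit, List.foldl_append]
    simp only [List.foldl_cons, List.foldl_nil]
    set T := (PySem.List.pyRange 1 ((j:Int)+1) 1).foldl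
      (fun t d => (PySem.List.pyRange (2*d) ((Nn:Int)+1) d).foldl
        (fun t m => PySem.List.pySetD t m (PySem.List.pyGetD t m [] ++ [d])) t)
      (List.replicate (Nn+1) ([] : List Int)) with hT
    have hTlen : T.length = Nn + 1 := by
      rw [hT, outer_length]
      · exact List.length_replicate
      · intro d hd
        have := (PySem.List.mem_pyRange_one).mp hd
        omega
    have hd1 : (0:Int) < (j:Int) + 1 := by omega
    rw [getD_setappend _ (nodup_pyRange_pos _ _ _ hd1)
      (fun x hx => by
        have := (PySem.List.mem_pyRange_iff_of_pos hd1 x).mp hx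
        omega) T _ m (by omega)]
    have hmemiff : ((m:Int) ∈ PySem.List.pyRange (2*((j:Int)+1)) ((Nn:Int)+1) ((j:Int)+1))
        ↔ ((j+1) ∣ m ∧ 2*(j+1) ≤ m) := by
      rw [PySem.List.mem_pyRange_iff_of_pos hd1]
      constructor
      · rintro ⟨h1, h2, h3⟩
        have hdvd : ((j:Int)+1) ∣ (m:Int) := by
          have : ((j:Int)+1) ∣ ((m:Int) - 2*((j:Int)+1)) + 2*((j:Int)+1) :=
            Dvd.dvd.add h3 ⟨2, by ring⟩
          simpa using this
        have : ((j+1 : Nat) : Int) ∣ ((m:Nat) : Int) := by push_cast; convert hdvd using 2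
        refine ⟨by exact_mod_cast this, by omega⟩
      · rintro ⟨h1, h2⟩
        have : ((j+1 : Nat) : Int) ∣ ((m:Nat) : Int) := by exact_mod_cast h1
        refine ⟨by omega, by omega, ?_⟩
        have h4 : ((j:Int)+1) ∣ (m:Int) := by push_cast at this ⊢; convert this using 2
        exact Dvd.dvd.sub h4 ⟨2, by ring⟩
    have hSv : Sv (j+1) m = Sv j m ++ (if (j+1) ∣ m ∧ 2*(j+1) ≤ m then [j+1] else []) := by
      rw [Sv, Sv, List.range_succ, List.filter_append]
      congr 1
      by_cases h : (j+1) ∣ m ∧ 2*(j+1) ≤ m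
      · rw [if_pos h]; simp [h.1, h.2]
      · rw [if_neg h]
        simp only [List.filter_cons, List.filter_nil]
        rw [if_neg (by simp only [decide_eq_true_eq]; tauto)]
    rw [ih (by omega), hSv]
    by_cases hc : (j+1) ∣ m ∧ 2*(j+1) ≤ m
    · rw [if_pos (hmemiff.mpr hc), if_pos hc]
      simp
    · rw [if_neg (fun h => hc (hmemiff.mp h)), if_neg hc]
      simp

lemma Sv_final (Nn m : Nat) (hm : m ≤ Nn) : Sv Nn m = pdiv m := by
  apply filter_range_congr
  intro d
  simp only [decide_eq_true_eq]
  constructor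
  · rintro ⟨h1, h2, h3, h4⟩
    exact ⟨by omega, h3⟩
  · rintro ⟨h1, h2⟩
    have hd0 : d ≠ 0 := by
      rintro rfl
      have : m = 0 := Nat.eq_zero_of_zero_dvd h2
      omega
    obtain ⟨k, hk⟩ := h2
    have hk2 : 2 ≤ k := by nlinarith
    exact ⟨by omega, hd0, ⟨k, hk⟩, by nlinarith⟩

lemma mainB (L j : Nat) (hj : j < L) (D : List (List Int))
    (hD : ∀ n : Nat, n < L →
      PySem.List.pyGetD D (n:Int) [] = (pdiv n).map (fun e : Nat => (e : Int))) :
    (PySem.List.pyRange 1 ((j:Int) + 1) 1).foldl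
      (fun phi n =>
        PySem.List.pySetD phi n (PySem.Int.floordiv (2 ^ n.toNat - 1)
          ((PySem.List.pyGetD D n []).foldl
            (fun den d => den * PySem.List.pyGetD phi d 0) 1)))
      (List.replicate L 0)
    = phiT j ++ List.replicate (L - (j+1)) 0 := by
  induction j with
  | zero =>
    rw [show ((0:Nat):Int) + 1 = 1 by norm_num, PySem.List.pyRange_one_eq_nil (le_refl 1)]
    simp only [List.foldl_nil]
    rw [show L = (L - 1) + 1 by omega, List.replicate_succ]
    simp [phiT]
  | succ j ih =>
    have hsplit : PySem.List.pyRange 1 (((j+1 : Nat) : Int) + 1) 1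
        = PySem.List.pyRange 1 ((j:Int)+1) 1 ++ [(j:Int)+1] := by
      rw [show ((j+1 : Nat) : Int) + 1 = ((j:Int)+1) + 1 by push_cast; ring]
      exact PySem.List.pyRange_one_succ_right (by omega)
    rw [hsplit, List.foldl_append, ih (by omega)]
    set s := phiT j ++ List.replicate (L - (j+1)) 0 with hs
    have hcast : ((j:Int)+1) = ((j+1 : Nat) : Int) := by push_cast; ring
    simp only [List.foldl_cons, List.foldl_nil, hcast]
    rw [hD (j+1) (by omega), List.foldl_map, foldl_mul, one_mul]
    have hden : ((pdiv (j+1)).map (fun e : Nat => PySem.List.pyGetD s (e:Int) 0))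
        = ((pdiv (j+1)).map (fun d => (phiT j).getD d 0)) := by
      apply List.map_eq_map_iff.mpr
      intro e he
      rw [mem_pdiv] at he
      rw [PySem.List.pyGetD_natCast]
      exact List.getD_append _ _ _ _ (by rw [phiT_length]; omega)
    rw [hden, PySem.List.pySetD_natCast, hs,
      List.set_append_right (j+1) _ (by simp [phiT_length])]
    rw [phiT_length]
    simp only [Nat.sub_self]
    rw [show L - (j+1) = (L - (j+2)) + 1 by omega, List.replicate_succ, List.set_cons_zero]
    simp only [Int.toNat_natCast]
    rw [show phiT (j+1) = phiT j ++
      [PySem.Int.floordiv (2 ^ (j+1) - 1)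
        (((pdiv (j+1)).map (fun d => (phiT j).getD d 0)).prod)] from rfl]
    simp [List.append_assoc]

theorem AB (N : Int) : cyclotomic_exact N = cyclotomic_exact_alt N := by
  by_cases hN : 0 ≤ N
  · have h1 : N + 1 = ((N.toNat : Int)) + 1 := by omega
    have h2 : ((N.toNat : Int) + 1).toNat = N.toNat + 1 := by omega
    unfold cyclotomic_exact cyclotomic_exact_alt
    simp only [h1, h2]
    rw [mainA (N.toNat + 1) N.toNat (by omega)]
    rw [mainB (N.toNat + 1) N.toNat (by omega) _ ?_]
    · intro n hn
      rw [PySem.List.pyGetD_natCast]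
      rw [sieveB N.toNat N.toNat (le_refl _) n (by omega), Sv_final N.toNat n (by omega)]
  · have h1 : N + 1 ≤ 1 := by omega
    unfold cyclotomic_exact cyclotomic_exact_alt
    rw [PySem.List.pyRange_one_eq_nil h1]
    simp

-- ===== VERDICT (by name: the statement is the Claim_ definition above) =====
theorem cyclotomic_exact_spec : Claim_equal_cyclotomic_exact := by
  intro N _
  unfold Spec_cyclotomic_exact
  exact AB N
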